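-- pv_equiv track=rewrite | github.com/nitin22032002/leetcode_question | Frogs and Jumps - GFG/frogs-and-jumps.py | unvisitedLeaves
-- ===== SOURCE A (Python) =====
-- def unvisitedLeaves(N, leaves, frogs):
--     d=set()
--     for item in frogs:
--         val=item
--         if(item in d):
--             continue
--         while(val<=leaves):
--             d.add(val)
--             val+=item
--     return leaves-len(d)
-- ===== SOURCE B (Python) =====
-- def unvisitedLeaves(N, leaves, frogs):
--     visited = sum(1 for p in range(1, leaves + 1) if any(p % f == 0 for f in frogs))
--     return leaves - visited
-- ===== Notes on version B (the rewrite author's own statement) =====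
-- stated objective: simpler
-- what changed: Instead of sieving each frog's multiples into a set (with a skip for frogs already marked), B scans each leaf position once and counts those divisible by some frog, then subtracts; no visited set is maintained.
import Mathlib
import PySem

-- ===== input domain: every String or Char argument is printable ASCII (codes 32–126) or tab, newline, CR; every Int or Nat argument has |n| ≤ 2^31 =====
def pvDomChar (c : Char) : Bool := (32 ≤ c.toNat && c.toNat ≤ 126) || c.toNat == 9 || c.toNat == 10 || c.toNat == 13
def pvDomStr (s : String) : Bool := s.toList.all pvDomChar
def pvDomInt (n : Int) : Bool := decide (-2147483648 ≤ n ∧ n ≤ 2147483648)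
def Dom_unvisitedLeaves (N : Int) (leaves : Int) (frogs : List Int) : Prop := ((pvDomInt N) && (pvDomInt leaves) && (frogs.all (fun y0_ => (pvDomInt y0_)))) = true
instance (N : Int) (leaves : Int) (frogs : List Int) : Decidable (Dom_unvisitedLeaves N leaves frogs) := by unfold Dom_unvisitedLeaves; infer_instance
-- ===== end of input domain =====

-- B replaces A's per-frog multiples sieve (a visited set) by a per-position divisibility count; same values, no set maintained.


-- ===== PORT A =====
-- Python's set d is modelled by Std.HashSet (d.add = insert, 'in' = contains, len = size), which is exact for
-- membership/size — the only ways A consumes d — and evaluates in O(1) per operation like Python's hash set.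
-- pvWhile is the inner 'while val <= leaves: d.add(val); val += item' loop; the fuel only makes it total
-- (within Pre_ the fuel 'leaves.toNat + 1' is never exhausted, see pvWhile_mem).
def pvWhile : Nat → Int → Int → Int → Std.HashSet Int → Std.HashSet Int
  | 0, _, _, _, d => d
  | fuel + 1, item, leaves, val, d =>
      if val ≤ leaves then pvWhile fuel item leaves (val + item) (d.insert val) else d

def unvisitedLeaves (N : Int) (leaves : Int) (frogs : List Int) : Int :=
  let d := frogs.foldl
    (fun d item =>
      if d.contains item then d
      else pvWhile (leaves.toNat + 1) item leaves item d)
    (∅ : Std.HashSet Int)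
  leaves - (d.size : Int)

-- ===== PORT B =====
def unvisitedLeaves_alt (N : Int) (leaves : Int) (frogs : List Int) : Int :=
  let visited : Int :=
    ((PySem.List.pyRange 1 (leaves + 1) 1).countP
      (fun p => frogs.any (fun f => PySem.Int.mod p f == 0)) : Nat)
  leaves - visited

-- ===== PRECONDITION & SPEC =====
-- Pre_ excludes frogs f ≤ 0 with f ≤ leaves: there A's 'val += item' never passes leaves, so A loops forever
-- (and B would divide by zero for f = 0); on every other input A returns normally.
def Pre_unvisitedLeaves (N : Int) (leaves : Int) (frogs : List Int) : Prop :=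
  ∀ f ∈ frogs, 0 < f ∨ leaves < f
instance (N : Int) (leaves : Int) (frogs : List Int) : Decidable (Pre_unvisitedLeaves N leaves frogs) := by
  unfold Pre_unvisitedLeaves; infer_instance
def pvWitness_unvisitedLeaves : Int × Int × List Int := (2, 10, [2, 3])

def Spec_unvisitedLeaves (N : Int) (leaves : Int) (frogs : List Int) (out : Int) : Prop := out = unvisitedLeaves_alt N leaves frogs
instance (N : Int) (leaves : Int) (frogs : List Int) (out : Int) : Decidable (Spec_unvisitedLeaves N leaves frogs out) := by unfold Spec_unvisitedLeaves; infer_instance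

-- ===== CLAIM (what is proved, stated in full; the proofs are below) =====
def Claim_equal_unvisitedLeaves : Prop := ∀ (N : Int) (leaves : Int) (frogs : List Int), Dom_unvisitedLeaves N leaves frogs → Pre_unvisitedLeaves N leaves frogs → Spec_unvisitedLeaves N leaves frogs (unvisitedLeaves N leaves frogs)

-- ===== LEMMAS AND PROOFS =====

-- membership of the while loop's result, for a positive step and enough fuel
theorem pvWhile_mem (item leaves : Int) (hi : 0 < item) (fuel : Nat) :
    ∀ (val : Int) (d : Std.HashSet Int), leaves < val + (fuel : Int) * item →
      ∀ y, (y ∈ pvWhile fuel item leaves val d ↔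
        y ∈ d ∨ ∃ k : Nat, y = val + (k : Int) * item ∧ y ≤ leaves) := by
  induction fuel with
  | zero =>
    intro val d hfuel y
    simp only [pvWhile]
    constructor
    · exact Or.inl
    · rintro (h | ⟨k, rfl, hk⟩)
      · exact h
      · exfalso
        have : (0:Int) ≤ (k : Int) * item := by positivity
        simp only [Nat.cast_zero, zero_mul, add_zero] at hfuel
        omega
  | succ n ih =>
    intro val d hfuel y
    simp only [pvWhile]
    split
    · rename_i hle
      rw [ih (val + item) (d.insert val) (by push_cast at hfuel ⊢; linarith) y,
          Std.HashSet.mem_insert]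
      simp only [beq_iff_eq]
      constructor
      · rintro ((rfl | h) | ⟨k, rfl, hk⟩)
        · exact Or.inr ⟨0, by simp, hle⟩
        · exact Or.inl h
        · exact Or.inr ⟨k + 1, by push_cast; ring, hk⟩
      · rintro (h | ⟨k, rfl, hk⟩)
        · exact Or.inl (Or.inr h)
        · cases k with
          | zero => exact Or.inl (Or.inl (by simp))
          | succ m => exact Or.inr ⟨m, by push_cast; ring, hk⟩
    · rename_i hgt
      constructor
      · exact Or.inl
      · rintro (h | ⟨k, rfl, hk⟩)
        · exact h
        · exfalso
          have : (0:Int) ≤ (k : Int) * item := by positivity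
          omega

-- positive multiples of a positive item, bounded by leaves
theorem mult_iff (item y leaves : Int) (hi : 0 < item) :
    (∃ k : Nat, y = item + (k : Int) * item ∧ y ≤ leaves) ↔ 1 ≤ y ∧ y ≤ leaves ∧ item ∣ y := by
  constructor
  · rintro ⟨k, rfl, hk⟩
    have h0 : (0:Int) ≤ (k : Int) * item := by positivity
    exact ⟨by omega, hk, ⟨1 + k, by ring⟩⟩
  · rintro ⟨h1, h2, m, rfl⟩
    have hm : 1 ≤ m := by nlinarith
    refine ⟨(m - 1).toNat, ?_, h2⟩
    have : ((m - 1).toNat : Int) = m - 1 := Int.toNat_of_nonneg (by omega)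
    rw [this]; ring

-- invariant for A's outer loop: after the fold the set holds exactly the old members plus
-- the positions in [1, leaves] divisible by some processed frog
theorem fold_spec (leaves : Int) (fs : List Int) :
    ∀ (d : Std.HashSet Int),
      (∀ f ∈ fs, 0 < f ∨ leaves < f) →
      (∀ y ∈ d, 1 ≤ y ∧ y ≤ leaves) →
      (∀ x ∈ d, ∀ y, 1 ≤ y → y ≤ leaves → x ∣ y → y ∈ d) →
      ∀ y, (y ∈ fs.foldl (fun d item =>
          if d.contains item then d
          else pvWhile (leaves.toNat + 1) item leaves item d) d ↔
        y ∈ d ∨ (1 ≤ y ∧ y ≤ leaves ∧ ∃ f ∈ fs, f ∣ y)) := by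
  induction fs with
  | nil =>
    intro d _ _ _ y
    simp
  | cons item fs ih =>
    intro d hpre hbd hcl y
    have hpre' : ∀ f ∈ fs, 0 < f ∨ leaves < f := fun f hf => hpre f (List.mem_cons_of_mem _ hf)
    simp only [List.foldl_cons]
    by_cases hmem : item ∈ d
    · rw [if_pos (Std.HashSet.contains_iff_mem.mpr hmem)]
      rw [ih d hpre' hbd hcl y]
      constructor
      · rintro (h | ⟨h1, h2, f, hf, hdvd⟩)
        · exact Or.inl h
        · exact Or.inr ⟨h1, h2, f, List.mem_cons_of_mem _ hf, hdvd⟩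
      · rintro (h | ⟨h1, h2, f, hf, hdvd⟩)
        · exact Or.inl h
        · rcases List.mem_cons.mp hf with rfl | hf'
          · exact Or.inl (hcl f hmem y h1 h2 hdvd)
          · exact Or.inr ⟨h1, h2, f, hf', hdvd⟩
    · rw [if_neg (by simpa [Std.HashSet.contains_iff_mem] using hmem)]
      rcases hpre item (List.mem_cons_self) with hi | hgt
      · -- positive frog: the while loop adds its multiples
        have hfuel : leaves < item + ((leaves.toNat + 1 : Nat) : Int) * item := by
          have h1 : leaves < ((leaves.toNat + 1 : Nat) : Int) := by
            push_cast; have := Int.self_le_toNat leaves; omega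
          calc leaves < ((leaves.toNat + 1 : Nat) : Int) := h1
            _ ≤ ((leaves.toNat + 1 : Nat) : Int) * item := le_mul_of_one_le_right (by positivity) hi
            _ ≤ item + ((leaves.toNat + 1 : Nat) : Int) * item := by omega
        have hmemw := pvWhile_mem item leaves hi (leaves.toNat + 1) item d hfuel
        set d₁ := pvWhile (leaves.toNat + 1) item leaves item d with hd₁
        have hmemw' : ∀ y, y ∈ d₁ ↔ y ∈ d ∨ (1 ≤ y ∧ y ≤ leaves ∧ item ∣ y) := by
          intro y; rw [hmemw y, mult_iff item y leaves hi]
        have hbd₁ : ∀ y ∈ d₁, 1 ≤ y ∧ y ≤ leaves := by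
          intro y hy
          rcases (hmemw' y).mp hy with h | ⟨h1, h2, _⟩
          · exact hbd y h
          · exact ⟨h1, h2⟩
        have hcl₁ : ∀ x ∈ d₁, ∀ y, 1 ≤ y → y ≤ leaves → x ∣ y → y ∈ d₁ := by
          intro x hx y h1 h2 hdvd
          rcases (hmemw' x).mp hx with hxd | ⟨_, _, hix⟩
          · exact (hmemw' y).mpr (Or.inl (hcl x hxd y h1 h2 hdvd))
          · exact (hmemw' y).mpr (Or.inr ⟨h1, h2, dvd_trans hix hdvd⟩)
        rw [ih d₁ hpre' hbd₁ hcl₁ y, hmemw' y]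
        constructor
        · rintro ((h | ⟨h1, h2, hdvd⟩) | ⟨h1, h2, f, hf, hdvd⟩)
          · exact Or.inl h
          · exact Or.inr ⟨h1, h2, item, List.mem_cons_self, hdvd⟩
          · exact Or.inr ⟨h1, h2, f, List.mem_cons_of_mem _ hf, hdvd⟩
        · rintro (h | ⟨h1, h2, f, hf, hdvd⟩)
          · exact Or.inl (Or.inl h)
          · rcases List.mem_cons.mp hf with rfl | hf'
            · exact Or.inl (Or.inr ⟨h1, h2, hdvd⟩)
            · exact Or.inr ⟨h1, h2, f, hf', hdvd⟩
      · -- leaves < item: the while guard fails at once, and no y in [1, leaves] is a multiple of item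
        have hstep : pvWhile (leaves.toNat + 1) item leaves item d = d := by
          simp [pvWhile, not_le.mpr hgt]
        rw [hstep, ih d hpre' hbd hcl y]
        constructor
        · rintro (h | ⟨h1, h2, f, hf, hdvd⟩)
          · exact Or.inl h
          · exact Or.inr ⟨h1, h2, f, List.mem_cons_of_mem _ hf, hdvd⟩
        · rintro (h | ⟨h1, h2, f, hf, hdvd⟩)
          · exact Or.inl h
          · rcases List.mem_cons.mp hf with rfl | hf'
            · -- f = item > leaves ≥ y ≥ 1 and f ∣ y is impossible
              exfalso
              have hfy : f ≤ y := Int.le_of_dvd (by omega) hdvd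
              omega
            · exact Or.inr ⟨h1, h2, f, hf', hdvd⟩

-- ===== VERDICT (by name: the statement is the Claim_ definition above) =====
theorem unvisitedLeaves_spec : Claim_equal_unvisitedLeaves := by
  intro N leaves frogs _ hpre
  unfold Spec_unvisitedLeaves unvisitedLeaves unvisitedLeaves_alt
  have hmem := fold_spec leaves frogs (∅ : Std.HashSet Int) hpre (by simp) (by simp)
  set d := frogs.foldl (fun d item =>
      if d.contains item then d
      else pvWhile (leaves.toNat + 1) item leaves item d) (∅ : Std.HashSet Int) with hd
  have hmem' : ∀ y, y ∈ d ↔ 1 ≤ y ∧ y ≤ leaves ∧ ∃ f ∈ frogs, f ∣ y := by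
    intro y; rw [hmem y]; simp
  have hnd : d.toList.Nodup := by
    have h := Std.HashSet.distinct_toList (m := d)
    simpa [List.Nodup, beq_eq_false_iff_ne] using h
  -- the visited set is a permutation of the filtered range, so the counts agree
  have hperm : d.toList.Perm ((PySem.List.pyRange 1 (leaves + 1) 1).filter
      (fun p => frogs.any (fun f => PySem.Int.mod p f == 0))) := by
    rw [List.perm_ext_iff_of_nodup hnd (List.Nodup.filter _ (PySem.List.nodup_pyRange_one 1 (leaves + 1)))]
    intro y
    rw [Std.HashSet.mem_toList, hmem' y, List.mem_filter, PySem.List.mem_pyRange_one]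
    simp only [List.any_eq_true, beq_iff_eq, PySem.Int.mod_eq_zero_iff_dvd]
    constructor
    · rintro ⟨h1, h2, hf⟩; exact ⟨⟨h1, by omega⟩, hf⟩
    · rintro ⟨⟨h1, h2⟩, hf⟩; exact ⟨h1, by omega, hf⟩
  have hlen : (d.size : Int) =
      ((PySem.List.pyRange 1 (leaves + 1) 1).countP
        (fun p => frogs.any (fun f => PySem.Int.mod p f == 0)) : Nat) := by
    rw [List.countP_eq_length_filter, ← hperm.length_eq, Std.HashSet.length_toList]
  simp only [hlen]
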